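-- pv_equiv track=rewrite | github.com/gcarrot/aoc2025 | day3/day3.py | max_k_digit_number_str
-- ===== SOURCE A (Python) =====
-- def max_k_digit_number_str(bank: str, k: int) -> str:
--     bank = bank.strip()
--     if len(bank) < k:
--         raise ValueError(f"Bank length {len(bank)} < k={k}: {bank!r}")
--
--     drops = len(bank) - k
--     stack = []
--
--     for ch in bank:
--         while drops and stack and stack[-1] < ch:
--             stack.pop()
--             drops -= 1
--         stack.append(ch)
--
--     if drops:
--         stack = stack[:-drops]
--
--     return "".join(stack[:k])
-- ===== SOURCE B (Python) =====
-- def max_k_digit_number_str(bank: str, k: int) -> str: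
--     bank = bank.strip()
--     if len(bank) < k:
--         raise ValueError(f"Bank length {len(bank)} < k={k}: {bank!r}")
--
--     result = []
--     start = 0
--     while len(result) < k:
--         remaining = k - len(result)
--         window = bank[start : len(bank) - remaining + 1]
--         best = max(window)
--         idx = window.index(best)
--         result.append(best)
--         start = start + idx + 1
--
--     return "".join(result)
-- ===== Notes on version B (the rewrite author's own statement) =====
-- stated objective: alternative
-- what changed: Replaces the monotonic drop-stack (pop smaller tops while drops remain, then trim) by greedy window selection: for each of the k output slots pick the leftmost maximum of bank[start : len(bank)-remaining+1] and advance start past it.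
import Mathlib
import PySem

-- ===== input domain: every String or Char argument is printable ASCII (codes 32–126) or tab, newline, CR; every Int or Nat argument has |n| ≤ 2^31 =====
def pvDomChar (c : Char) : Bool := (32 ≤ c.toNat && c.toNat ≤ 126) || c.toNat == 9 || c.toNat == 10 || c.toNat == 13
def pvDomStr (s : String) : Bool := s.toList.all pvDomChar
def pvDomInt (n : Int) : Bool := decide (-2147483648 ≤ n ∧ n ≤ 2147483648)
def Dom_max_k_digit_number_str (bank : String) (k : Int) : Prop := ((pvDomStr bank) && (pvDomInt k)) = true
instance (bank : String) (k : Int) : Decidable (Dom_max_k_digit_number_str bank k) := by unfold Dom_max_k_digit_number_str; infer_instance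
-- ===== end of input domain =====

-- B replaces A's monotonic drop-stack by greedy leftmost-max window selection (alternative algorithm, not faster).

-- ===== PORT A =====
-- the Python 'while drops and stack and stack[-1] < ch' pop loop; the stack is kept
-- reversed (head = Python stack[-1]), the final reverse restores Python's order
def pvPopA (stack : List Char) (drops : Int) (ch : Char) : List Char × Int :=
  match stack with
  | [] => (stack, drops)
  | top :: rest =>
    if drops ≠ 0 ∧ top < ch then pvPopA rest (drops - 1) ch else (stack, drops)

-- the 'for ch in bank' loop over state (stack, drops)
def pvRunA (st : List Char × Int) (cs : List Char) : List Char × Int :=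
  cs.foldl (fun st ch => let p := pvPopA st.1 st.2 ch; (ch :: p.1, p.2)) st

-- A's body after the strip and the ValueError guard (the guard is Pre_)
def pvAnsA (b : List Char) (k : Int) : List Char :=
  let drops : Int := (b.length : Int) - k
  let r := pvRunA ([], drops) b
  let stack := r.1.reverse
  let stack := if r.2 ≠ 0 then PySem.List.slice stack none (some (-r.2)) else stack
  PySem.List.slice stack none (some k)

def max_k_digit_number_str (bank : String) (k : Int) : String :=
  String.mk (pvAnsA (PySem.Str.strip bank).toList k)

-- ===== PORT B =====
-- the 'while len(result) < k' loop; rem = k - len(result) drops by one per iteration,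
-- so the loop runs exactly max(k,0) times — rem starts at k.toNat
def pvGreedyB (b : List Char) (start : Nat) (rem : Nat) : List Char :=
  match rem with
  | 0 => []
  | r + 1 =>
    let window := PySem.List.slice b (some (start : Int)) (some ((b.length : Int) - ((r : Int) + 1) + 1))
    match PySem.List.max? window (fun c => c) with
    | none => []        -- unreachable under Pre_: Python max() would raise on an empty window
    | some best =>
      match PySem.List.index? window best with
      | none => []      -- unreachable: best ∈ window
      | some idx => best :: pvGreedyB b (start + idx + 1) r

def max_k_digit_number_str_alt (bank : String) (k : Int) : String :=
  String.mk (pvGreedyB (PySem.Str.strip bank).toList 0 k.toNat)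

-- ===== PRECONDITION & SPEC =====
-- Pre_ excludes exactly the inputs where A (and B) raise ValueError: len(bank.strip()) < k
def Pre_max_k_digit_number_str (bank : String) (k : Int) : Prop :=
  k ≤ ((PySem.Str.strip bank).toList.length : Int)
instance (bank : String) (k : Int) : Decidable (Pre_max_k_digit_number_str bank k) := by
  unfold Pre_max_k_digit_number_str; infer_instance

def pvWitness_max_k_digit_number_str : String × Int := ("1432219", 4)

def Spec_max_k_digit_number_str (bank : String) (k : Int) (out : String) : Prop := out = max_k_digit_number_str_alt bank k
instance (bank : String) (k : Int) (out : String) : Decidable (Spec_max_k_digit_number_str bank k out) := by unfold Spec_max_k_digit_number_str; infer_instance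

-- ===== CLAIM (what is proved, stated in full; the proofs are below) =====
def Claim_equal_max_k_digit_number_str : Prop := ∀ (bank : String) (k : Int), Dom_max_k_digit_number_str bank k → Pre_max_k_digit_number_str bank k → Spec_max_k_digit_number_str bank k (max_k_digit_number_str bank k)

-- ===== LEMMAS AND PROOFS =====

-- drops never go negative and only decrease
theorem pvPopA_nonneg (st : List Char) (d : Int) (ch : Char) (h : 0 ≤ d) :
    0 ≤ (pvPopA st d ch).2 ∧ (pvPopA st d ch).2 ≤ d := by
  induction st generalizing d with
  | nil => simp [pvPopA, h]
  | cons t rest ih =>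
    simp only [pvPopA]
    split
    · rename_i hc
      have := ih (d - 1) (by omega)
      omega
    · simp [h]

-- pops consumed = drops consumed
theorem pvPopA_len (st : List Char) (d : Int) (ch : Char) :
    ((pvPopA st d ch).1.length : Int) - (pvPopA st d ch).2 = (st.length : Int) - d := by
  induction st generalizing d with
  | nil => simp [pvPopA]
  | cons t rest ih =>
    simp only [pvPopA]
    split
    · have := ih (d - 1); simp at this ⊢; omega
    · simp

-- the result stack is a suffix of the input stack
theorem pvPopA_suffix (st : List Char) (d : Int) (ch : Char) :
    (pvPopA st d ch).1 <:+ st := by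
  induction st generalizing d with
  | nil => simp [pvPopA]
  | cons t rest ih =>
    simp only [pvPopA]
    split
    · exact (ih (d - 1)).trans (List.suffix_cons t rest)
    · exact List.suffix_rfl

-- everything smaller than ch gets popped when drops suffice
theorem pvPopA_all_lt (st : List Char) (d : Int) (ch : Char)
    (h : ∀ x ∈ st, x < ch) (hd : (st.length : Int) ≤ d) (h0 : 0 ≤ d) :
    pvPopA st d ch = ([], d - st.length) := by
  induction st generalizing d with
  | nil => simp [pvPopA]
  | cons t rest ih =>
    simp only [pvPopA]
    rw [if_pos]
    · rw [ih (d - 1) (fun x hx => h x (by simp [hx])) (by simp at hd ⊢; omega) (by simp at hd; omega)]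
      simp; ring_nf
    · constructor
      · simp at hd; omega
      · exact h t (by simp)

-- the bottom element survives one pop phase when it cannot be reached
theorem pvPopA_append_bottom (u : List Char) (c : Char) (d : Int) (ch : Char)
    (h : ¬ c < ch ∨ d ≤ (u.length : Int)) (h0 : 0 ≤ d) :
    pvPopA (u ++ [c]) d ch = ((pvPopA u d ch).1 ++ [c], (pvPopA u d ch).2) := by
  induction u generalizing d with
  | nil =>
    simp only [List.nil_append, pvPopA]
    rw [if_neg]
    rcases h with h | h
    · exact fun hc => h hc.2
    · intro hc; simp at h; exact hc.1 (by omega)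
  | cons t rest ih =>
    simp only [List.cons_append, pvPopA]
    split
    · rename_i hc
      apply ih (d - 1)
      · rcases h with h | h
        · exact Or.inl h
        · right; simp at h ⊢; omega
      · omega
    · simp

-- foldl over an appended list
theorem pvRunA_append (st : List Char × Int) (xs ys : List Char) :
    pvRunA st (xs ++ ys) = pvRunA (pvRunA st xs) ys := by
  simp [pvRunA, List.foldl_append]

-- run invariant: drops stay in [0, d0], length-drops balance, elements come from stack or input
theorem pvRunA_inv (cs : List Char) (st : List Char × Int) (h0 : 0 ≤ st.2) :
    0 ≤ (pvRunA st cs).2 ∧ (pvRunA st cs).2 ≤ st.2 ∧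
    ((pvRunA st cs).1.length : Int) - (pvRunA st cs).2 = (st.1.length : Int) - st.2 + cs.length ∧
    (∀ x ∈ (pvRunA st cs).1, x ∈ st.1 ∨ x ∈ cs) := by
  induction cs generalizing st with
  | nil => simp [pvRunA, h0]
  | cons ch cs ih =>
    have hstep : pvRunA st (ch :: cs) =
        pvRunA (ch :: (pvPopA st.1 st.2 ch).1, (pvPopA st.1 st.2 ch).2) cs := by
      simp [pvRunA]
    have hp := pvPopA_nonneg st.1 st.2 ch h0
    have hl := pvPopA_len st.1 st.2 ch
    have hs := pvPopA_suffix st.1 st.2 ch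
    have := ih (ch :: (pvPopA st.1 st.2 ch).1, (pvPopA st.1 st.2 ch).2) (by simpa using hp.1)
    rw [hstep]
    refine ⟨this.1, by simp at this ⊢; omega, by simp at this hl ⊢; omega, ?_⟩
    intro x hx
    rcases this.2.2.2 x hx with hx' | hx'
    · rcases List.mem_cons.mp hx' with rfl | hx''
      · exact Or.inr (by simp)
      · exact Or.inl (hs.subset hx'')
    · exact Or.inr (by simp [hx'])

-- a strictly smaller prefix followed by c collapses to [c] when drops suffice
theorem pvRunA_prefix_collapse (p : List Char) (c : Char) (d : Int)
    (h : ∀ x ∈ p, x < c) (hd : (p.length : Int) ≤ d) (h0 : 0 ≤ d) :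
    pvRunA ([], d) (p ++ [c]) = ([c], d - p.length) := by
  rw [pvRunA_append]
  obtain ⟨h1, h2, h3, h4⟩ := pvRunA_inv p (([] : List Char), d) (by simpa)
  set r := pvRunA ([], d) p with hr
  have hall : ∀ x ∈ r.1, x < c := by
    intro x hx; rcases h4 x hx with hx' | hx'
    · simp at hx'
    · exact h x hx'
  have hlen : (r.1.length : Int) ≤ r.2 := by simp at h3; omega
  have : pvRunA r [c] = (c :: (pvPopA r.1 r.2 c).1, (pvPopA r.1 r.2 c).2) := by
    simp [pvRunA]
  rw [show r = (r.1, r.2) from rfl] at this ⊢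
  rw [this, pvPopA_all_lt r.1 r.2 c hall hlen h1]
  simp at h3 ⊢
  omega

-- the bottom element survives the whole run when every char that beats it comes too late
theorem pvRunA_bottom (cs : List Char) (u : List Char) (c : Char) (d : Int) (h0 : 0 ≤ d)
    (H : ∀ j (hj : j < cs.length), c < cs[j] → d ≤ (j : Int) + u.length) :
    pvRunA (u ++ [c], d) cs = ((pvRunA (u, d) cs).1 ++ [c], (pvRunA (u, d) cs).2) := by
  induction cs generalizing u d with
  | nil => simp [pvRunA]
  | cons ch cs ih =>
    have hpop : pvPopA (u ++ [c]) d ch = ((pvPopA u d ch).1 ++ [c], (pvPopA u d ch).2) := by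
      apply pvPopA_append_bottom u c d ch ?_ h0
      by_cases hc : c < ch
      · exact Or.inr (by have := H 0 (by simp) (by simpa using hc); simpa using this)
      · exact Or.inl hc
    have hstep1 : pvRunA (u ++ [c], d) (ch :: cs) =
        pvRunA (ch :: (pvPopA u d ch).1 ++ [c], (pvPopA u d ch).2) cs := by
      simp [pvRunA, hpop]
    have hstep2 : pvRunA (u, d) (ch :: cs) =
        pvRunA (ch :: (pvPopA u d ch).1, (pvPopA u d ch).2) cs := by
      simp [pvRunA]
    rw [hstep1, hstep2]
    have hp := pvPopA_nonneg u d ch h0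
    have hl := pvPopA_len u d ch
    apply ih
    · exact hp.1
    · intro j hj hcj
      have := H (j + 1) (by simpa using hj) (by simpa using hcj)
      simp at this ⊢
      omega

-- slicing the empty list is empty
theorem pvSliceNil (b : Int) : PySem.List.slice ([] : List Char) none (some b) = [] := by
  rcases (by omega : 0 ≤ b ∨ b < 0) with h | h
  · rw [PySem.List.slice_to _ h]; simp
  · have hb : b = -(((-b).toNat : Nat) : Int) := by omega
    rw [hb, PySem.List.slice_to_neg_natCast _ _ (by omega)]
    simp

-- for k ≤ 0 A returns "" (the trim removes everything, and [:k] of [] is [])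
theorem pvAnsA_nonpos (b : List Char) (k : Int) (hk : k ≤ 0) : pvAnsA b k = [] := by
  unfold pvAnsA
  obtain ⟨h1, h2, h3, _⟩ := pvRunA_inv b (([] : List Char), (b.length : Int) - k) (by simp; omega)
  set r := pvRunA ([], (b.length : Int) - k) b with hr
  simp only []
  have hlen : (r.1.length : Int) ≤ r.2 := by simp at h3; omega
  have htrim : (if r.2 ≠ 0 then PySem.List.slice r.1.reverse none (some (-r.2)) else r.1.reverse) = [] := by
    by_cases hz : r.2 = 0
    · have : r.1.length = 0 := by omega
      simp [hz, List.length_eq_zero_iff.mp this]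
    · rw [if_pos hz]
      have hb : -r.2 = -(((r.2).toNat : Nat) : Int) := by omega
      rw [hb, PySem.List.slice_to_neg_natCast _ _ (by omega)]
      have h0' : r.1.reverse.length - (r.2).toNat = 0 := by simp; omega
      rw [h0', List.take_zero]
  rw [htrim, pvSliceNil]


-- A's trim ('stack[:-drops]' then '[:k]') is 'take r' when length = r + drops
theorem pvTrimSlice (S : List Char) (d : Int) (r : Nat) (h0 : 0 ≤ d)
    (hlen : (S.length : Int) = (r : Int) + d) :
    PySem.List.slice (if d ≠ 0 then PySem.List.slice S none (some (-d)) else S) none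
      (some (r : Int)) = S.take r := by
  by_cases hz : d = 0
  · subst hz
    rw [if_neg (by simp), PySem.List.slice_to _ (by omega)]
    simp
  · rw [if_pos hz]
    rw [show -d = -(((d.toNat : Nat)) : Int) by omega,
        PySem.List.slice_to_neg_natCast _ _ (by omega)]
    have hr : S.length - d.toNat = r := by omega
    rw [hr, PySem.List.slice_to _ (by omega)]
    simp

-- A's answer obeys the greedy recursion: head = leftmost max of the first window,
-- tail = A's answer on the rest of the string
theorem pvAnsA_step (r : Nat) (b : List Char) (hrb : r + 1 ≤ b.length)
    (c : Char) (i : Nat)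
    (hmax : PySem.List.max? (b.take (b.length - r)) (fun x => x) = some c)
    (hidx : PySem.List.index? (b.take (b.length - r)) c = some i) :
    pvAnsA b ((r : Int) + 1) = c :: pvAnsA (b.drop (i + 1)) (r : Int) := by
  have hwlen : (b.take (b.length - r)).length = b.length - r := by simp
  obtain ⟨hk, hwc, hbefore⟩ := PySem.List.getElem_of_index?_eq_some hidx
  have hile : i < b.length - r := hwlen ▸ hk
  have hle : ∀ y ∈ b.take (b.length - r), y ≤ c := fun y hy => PySem.List.max?_isMax hmax y hy
  have hbi : b[i]'(by omega) = c := by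
    rw [← hwc]; simp
  -- the prefix before position i lies strictly below c
  have hplt : ∀ x ∈ b.take i, x < c := by
    intro x hx
    obtain ⟨j, hj, rfl⟩ := List.getElem_of_mem hx
    have hj' : j < i := by have hj2 := hj; simp at hj2; omega
    have hgj : (b.take i)[j]'hj = b[j]'(by omega) := by simp
    have hne : b[j]'(by omega) ≠ c := by
      have := hbefore j (by omega)
      rwa [show (b.take (b.length - r))[j]'(by simp; omega) = b[j]'(by omega) by simp] at this
    have hlej : b[j]'(by omega) ≤ c := by
      apply hle
      rw [show b[j]'(by omega) = (b.take (b.length - r))[j]'(by simp; omega) by simp]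
      exact List.getElem_mem _
    rw [hgj]
    exact lt_of_le_of_ne hlej hne
  have hsplit : b = (b.take i ++ [c]) ++ b.drop (i + 1) := by
    have h1 : b.take (i + 1) = b.take i ++ [c] := by
      rw [List.take_succ]
      congr 1
      rw [List.getElem?_eq_getElem (by omega), hbi]
      rfl
    rw [← h1, List.take_append_drop]
  have hti : (b.take i).length = i := by simp; omega
  set d0 : Int := (b.length : Int) - ((r : Int) + 1) with hd0def
  have h0d : (0 : Int) ≤ d0 := by simp [hd0def]; omega
  have hpref : pvRunA ([], d0) (b.take i ++ [c]) = ([c], d0 - i) := by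
    rw [pvRunA_prefix_collapse (b.take i) c d0 hplt (by rw [hti]; simp [hd0def]; omega) h0d, hti]
  have hbot : pvRunA ([c], d0 - i) (b.drop (i + 1)) =
      ((pvRunA ([], d0 - i) (b.drop (i + 1))).1 ++ [c],
       (pvRunA ([], d0 - i) (b.drop (i + 1))).2) := by
    have H : ∀ j (hj : j < (b.drop (i + 1)).length), c < (b.drop (i + 1))[j] →
        d0 - i ≤ (j : Int) + (([] : List Char).length : Int) := by
      intro j hj hcj
      simp only [List.length_nil, Nat.cast_zero, add_zero]
      by_contra hlt
      rw [Int.not_le] at hlt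
      have hj2 : i + 1 + j < b.length - r := by simp [hd0def] at hlt ⊢; omega
      have hjb : i + 1 + j < b.length := by omega
      have hdg : (b.drop (i + 1))[j]'hj = b[i + 1 + j]'hjb := by
        simp [List.getElem_drop]
      have hmem : b[i + 1 + j]'hjb ∈ b.take (b.length - r) := by
        rw [show b[i + 1 + j]'hjb = (b.take (b.length - r))[i + 1 + j]'(by simp; omega) by simp]
        exact List.getElem_mem _
      have := hle _ hmem
      rw [hdg] at hcj
      exact absurd hcj (not_lt.2 this)
    have := pvRunA_bottom (b.drop (i + 1)) [] c (d0 - i) (by simp [hd0def]; omega) H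
    simpa using this
  have hrun : pvRunA ([], d0) b =
      ((pvRunA ([], d0 - i) (b.drop (i + 1))).1 ++ [c],
       (pvRunA ([], d0 - i) (b.drop (i + 1))).2) := by
    conv_lhs => rw [hsplit]
    rw [pvRunA_append, hpref, hbot]
  obtain ⟨hs1, hs2, hs3, _⟩ := pvRunA_inv (b.drop (i + 1)) (([] : List Char), d0 - i)
    (by simp [hd0def]; omega)
  set s := pvRunA ([], d0 - i) (b.drop (i + 1)) with hsdef
  have hslen : ((s.1.reverse).length : Int) = (r : Int) + s.2 := by
    simp [hd0def] at hs3 ⊢; omega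
  have hdrops2 : ((b.drop (i + 1)).length : Int) - (r : Int) = d0 - i := by
    simp [hd0def]; omega
  -- LHS
  unfold pvAnsA
  simp only [← hd0def]
  rw [hrun, hdrops2, ← hsdef]
  have hLrev : (s.1 ++ [c]).reverse = c :: s.1.reverse := by simp
  rw [hLrev]
  have hL := pvTrimSlice (c :: s.1.reverse) s.2 (r + 1) hs1 (by simp at hslen ⊢; omega)
  have hR := pvTrimSlice s.1.reverse s.2 r hs1 hslen
  rw [show (((r + 1 : Nat)) : Int) = ((r : Int) + 1) by omega] at hL
  dsimp only
  rw [hL, hR]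
  simp

-- shifting the start pointer is the same as dropping the prefix
theorem pvGreedyB_shift (rem : Nat) : ∀ (b : List Char) (start : Nat),
    start + rem ≤ b.length → pvGreedyB b start rem = pvGreedyB (b.drop start) 0 rem := by
  induction rem with
  | zero => intro b start h; simp [pvGreedyB]
  | succ r ih =>
    intro b start h
    have hw : PySem.List.slice b (some (start : Int)) (some ((b.length : Int) - ((r : Int) + 1) + 1)) =
        PySem.List.slice (b.drop start) (some ((0 : Nat) : Int))
          (some (((b.drop start).length : Int) - ((r : Int) + 1) + 1)) := by
      rw [PySem.List.slice_toNat _ (by omega) (by omega)]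
      simp only [Nat.cast_zero]
      rw [PySem.List.slice_zero_start, PySem.List.slice_to _ (by simp; omega)]
      congr 1
      simp only [List.length_drop]
      omega
    set w := PySem.List.slice (b.drop start) (some ((0 : Nat) : Int))
        (some (((b.drop start).length : Int) - ((r : Int) + 1) + 1)) with hwdef
    have hwlen : w.length = b.length - start - r := by
      rw [hwdef]
      simp only [Nat.cast_zero]
      rw [PySem.List.slice_zero_start, PySem.List.slice_to _ (by simp; omega)]
      simp
      omega
    have hwne : w ≠ [] := by
      intro hnil
      rw [hnil] at hwlen
      simp at hwlen
      omega
    obtain ⟨best, hmax⟩ : ∃ c, PySem.List.max? w (fun c => c) = some c := by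
      cases hm : PySem.List.max? w (fun c => c) with
      | none => exact absurd ((PySem.List.max?_eq_none_iff _ _).mp hm) hwne
      | some c => exact ⟨c, rfl⟩
    obtain ⟨idx, hidx⟩ : ∃ i, PySem.List.index? w best = some i := by
      have hmem : best ∈ w := PySem.List.max?_mem hmax
      cases hi : PySem.List.index? w best with
      | none => exact absurd hmem ((PySem.List.index?_eq_none_iff _ _).mp hi)
      | some i => exact ⟨i, rfl⟩
    obtain ⟨hik, _, _⟩ := PySem.List.getElem_of_index?_eq_some hidx
    have hib : idx < b.length - start - r := hwlen ▸ hik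
    have e1 : pvGreedyB b start (r + 1) = best :: pvGreedyB b (start + idx + 1) r := by
      simp only [pvGreedyB, hw, hmax, hidx]
    have e2 : pvGreedyB (b.drop start) 0 (r + 1) = best :: pvGreedyB (b.drop start) (idx + 1) r := by
      simp only [pvGreedyB, ← hwdef, hmax, hidx, Nat.zero_add]
    rw [e1, e2, ih b (start + idx + 1) (by omega), ih (b.drop start) (idx + 1) (by simp; omega),
        List.drop_drop]
    rw [show start + (idx + 1) = start + idx + 1 by omega]

-- main induction: A's answer = B's greedy selection, for 0 ≤ rem ≤ len
theorem pvMain (rem : Nat) : ∀ (b : List Char), rem ≤ b.length →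
    pvAnsA b (rem : Int) = pvGreedyB b 0 rem := by
  induction rem with
  | zero => intro b h; simp only [Nat.cast_zero]; rw [pvAnsA_nonpos b 0 le_rfl]; rfl
  | succ r ih =>
    intro b h
    have hwin : PySem.List.slice b (some ((0 : Nat) : Int))
        (some ((b.length : Int) - ((r : Int) + 1) + 1)) = b.take (b.length - r) := by
      simp only [Nat.cast_zero]
      rw [PySem.List.slice_zero_start, PySem.List.slice_to _ (by omega)]
      congr 1
      omega
    have hwne : b.take (b.length - r) ≠ [] := by
      have : (b.take (b.length - r)).length = b.length - r := by simp
      intro hnil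
      rw [hnil] at this
      simp at this
      omega
    obtain ⟨c, hmax⟩ : ∃ c, PySem.List.max? (b.take (b.length - r)) (fun x => x) = some c := by
      cases hm : PySem.List.max? (b.take (b.length - r)) (fun x => x) with
      | none => exact absurd ((PySem.List.max?_eq_none_iff _ _).mp hm) hwne
      | some c => exact ⟨c, rfl⟩
    obtain ⟨i, hidx⟩ : ∃ i, PySem.List.index? (b.take (b.length - r)) c = some i := by
      have hmem : c ∈ b.take (b.length - r) := PySem.List.max?_mem hmax
      cases hi : PySem.List.index? (b.take (b.length - r)) c with
      | none => exact absurd hmem ((PySem.List.index?_eq_none_iff _ _).mp hi)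
      | some i => exact ⟨i, rfl⟩
    obtain ⟨hik, _, _⟩ := PySem.List.getElem_of_index?_eq_some hidx
    have hib : i < b.length - r := by simpa using hik
    have hgreedy : pvGreedyB b 0 (r + 1) = c :: pvGreedyB b (i + 1) r := by
      simp only [pvGreedyB, hwin, hmax, hidx, Nat.zero_add]
    rw [show (((r + 1 : Nat)) : Int) = ((r : Int) + 1) by omega,
        pvAnsA_step r b h c i hmax hidx, hgreedy,
        pvGreedyB_shift r b (i + 1) (by omega), ih (b.drop (i + 1)) (by simp; omega)]

-- ===== VERDICT (by name: the statement is the Claim_ definition above) =====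
theorem max_k_digit_number_str_spec : Claim_equal_max_k_digit_number_str := by
  unfold Claim_equal_max_k_digit_number_str
  intro bank k _ hpre
  unfold Pre_max_k_digit_number_str at hpre
  unfold Spec_max_k_digit_number_str max_k_digit_number_str max_k_digit_number_str_alt
  congr 1
  rcases (by omega : k ≤ 0 ∨ 0 < k) with hk | hk
  · rw [pvAnsA_nonpos _ _ hk, show k.toNat = 0 by omega]
    rfl
  · rw [show k = ((k.toNat : Nat) : Int) by omega]
    exact pvMain k.toNat _ (by omega)
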